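-- pv_equiv track=rewrite | github.com/cgooooo/Astro98_Python | Homework/HW4/Gomez_Celeste_HW4.2.3.py | oddnumslist
-- ===== SOURCE A (Python) =====
-- def oddnumslist(listA, listB):
--     combolist = listA + listB
--     oddnums = []
--
--     for num in combolist:
--         if num % 2 != 0:             #if a number is not divisible by 2, then it will have a remainder thats not = 0, so its odd
--             oddnums.append(num)
--
--     x = len(oddnums)
--     for i in range(x-1):
--         for j in range(0, x-i-1):
--             if oddnums[j] > oddnums[j+1]:
--                 oddnums[j], oddnums[j+1] = oddnums[j+1], oddnums[j]
--     return oddnums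
-- ===== SOURCE B (Python) =====
-- def _insort(sorted_list, num):
--     # insert num into the already-sorted list, after any equal elements
--     i = 0
--     while i < len(sorted_list) and sorted_list[i] <= num:
--         i += 1
--     sorted_list.insert(i, num)
--
--
-- def oddnumslist(listA, listB):
--     result = []
--     for num in listA + listB:
--         if num % 2 != 0:
--             _insort(result, num)
--     return result
-- ===== Notes on version B (the rewrite author's own statement) =====
-- stated objective: alternative
-- what changed: Replaces collect-then-bubble-sort (nested adjacent-swap passes) with a single online insertion sort: each odd number is inserted directly at its place in an always-sorted result list.
import Mathlib
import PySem

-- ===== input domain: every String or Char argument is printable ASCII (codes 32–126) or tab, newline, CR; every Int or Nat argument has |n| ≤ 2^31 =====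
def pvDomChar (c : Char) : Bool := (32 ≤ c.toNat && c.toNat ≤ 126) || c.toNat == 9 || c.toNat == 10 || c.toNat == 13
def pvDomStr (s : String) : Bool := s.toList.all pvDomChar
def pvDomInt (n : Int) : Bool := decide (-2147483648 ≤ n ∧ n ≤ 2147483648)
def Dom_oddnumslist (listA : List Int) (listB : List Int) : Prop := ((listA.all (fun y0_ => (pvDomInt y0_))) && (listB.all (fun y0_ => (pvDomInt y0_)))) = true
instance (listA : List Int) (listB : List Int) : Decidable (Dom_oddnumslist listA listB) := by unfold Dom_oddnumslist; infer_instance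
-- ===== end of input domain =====

-- ===== PORT A =====
-- B replaces A's collect-then-bubble-sort with an online insertion sort (alternative algorithm, same quadratic worst case).

-- one bubble pass doing n adjacent comparisons/swaps (inner j-loop of A)
def pvPass : Nat → List Int → List Int
  | 0, l => l
  | _ + 1, [] => []
  | _ + 1, [a] => [a]
  | n + 1, a :: b :: t => if a > b then b :: pvPass n (a :: t) else a :: pvPass n (b :: t)

-- outer i-loop of A: pass counts x-1, x-2, …, 1
def pvBubble : Nat → List Int → List Int
  | 0, l => l
  | k + 1, l => pvBubble k (pvPass (k + 1) l)

def oddnumslist (listA : List Int) (listB : List Int) : List Int :=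
  let combolist := listA ++ listB
  let oddnums := combolist.foldl (fun acc num => if PySem.Int.mod num 2 ≠ 0 then acc ++ [num] else acc) []
  pvBubble (oddnums.length - 1) oddnums

-- ===== PORT B =====
-- _insort of Source B: walk past the ≤ prefix, insert before the first strictly greater element
def pvInsort (l : List Int) (x : Int) : List Int :=
  match l with
  | [] => [x]
  | a :: t => if a ≤ x then a :: pvInsort t x else x :: a :: t

def oddnumslist_alt (listA : List Int) (listB : List Int) : List Int :=
  (listA ++ listB).foldl (fun result num => if PySem.Int.mod num 2 ≠ 0 then pvInsort result num else result) []

-- ===== PRECONDITION & SPEC =====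
def Spec_oddnumslist (listA : List Int) (listB : List Int) (out : List Int) : Prop := out = oddnumslist_alt listA listB
instance (listA : List Int) (listB : List Int) (out : List Int) : Decidable (Spec_oddnumslist listA listB out) := by unfold Spec_oddnumslist; infer_instance

-- ===== CLAIM (what is proved, stated in full; the proofs are below) =====
def Claim_equal_oddnumslist : Prop := ∀ (listA : List Int) (listB : List Int), Dom_oddnumslist listA listB → Spec_oddnumslist listA listB (oddnumslist listA listB)

-- ===== LEMMAS AND PROOFS =====

theorem pvPass_perm : ∀ (n : Nat) (l : List Int), (pvPass n l).Perm l
  | 0, l => by simp [pvPass]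
  | _ + 1, [] => by simp [pvPass]
  | _ + 1, [a] => by simp [pvPass]
  | n + 1, a :: b :: t => by
    simp only [pvPass]
    split_ifs
    · exact ((pvPass_perm n (a :: t)).cons b).trans (List.Perm.swap a b t)
    · exact (pvPass_perm n (b :: t)).cons a

theorem pvPass_append : ∀ (n : Nat) (p s : List Int), n + 1 ≤ p.length →
    pvPass n (p ++ s) = pvPass n p ++ s
  | 0, p, s, _ => by simp [pvPass]
  | _ + 1, [], _, h => by simp at h
  | _ + 1, [a], _, h => by simp at h
  | n + 1, a :: b :: t, s, h => by
    simp only [List.cons_append, pvPass]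
    have ht : n + 1 ≤ t.length + 1 := by simp at h; omega
    split_ifs
    · rw [show a :: (t ++ s) = (a :: t) ++ s by simp,
        pvPass_append n (a :: t) s (by simpa using ht)]
      simp
    · rw [show b :: (t ++ s) = (b :: t) ++ s by simp,
        pvPass_append n (b :: t) s (by simpa using ht)]
      simp

theorem pvPass_last : ∀ (p : List Int), p ≠ [] →
    ∃ q M, pvPass (p.length - 1) p = q ++ [M] ∧ (q ++ [M]).Perm p ∧ ∀ a ∈ q, a ≤ M
  | [], h => absurd rfl h
  | [a], _ => ⟨[], a, by simp [pvPass], by simp, by simp⟩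
  | a :: b :: t, _ => by
    have core : ∀ x y : Int, x ≤ y →
        ∃ q M, x :: pvPass t.length (y :: t) = q ++ [M] ∧
          (q ++ [M]).Perm (x :: y :: t) ∧ ∀ c ∈ q, c ≤ M := by
      intro x y hxy
      obtain ⟨q', M', heq, hperm, hbnd⟩ := pvPass_last (y :: t) (by simp)
      rw [show (y :: t).length - 1 = t.length by simp] at heq
      have hyM : y ≤ M' := by
        have hy : y ∈ q' ++ [M'] := hperm.mem_iff.mpr (List.mem_cons_self ..)
        rcases List.mem_append.mp hy with h' | h'
        · exact hbnd y h'
        · simp at h'; omega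
      refine ⟨x :: q', M', by simp [heq], ?_, ?_⟩
      · simpa using hperm.cons x
      · intro c hc
        rcases List.mem_cons.mp hc with rfl | hc
        · omega
        · exact hbnd c hc
    simp only [List.length_cons, Nat.add_sub_cancel, pvPass]
    split_ifs with hab
    · obtain ⟨q, M, heq, hperm, hbnd⟩ := core b a (le_of_lt hab)
      exact ⟨q, M, heq, hperm.trans (List.Perm.swap a b t), hbnd⟩
    · exact core a b (by omega)
  termination_by p => p.length
  decreasing_by simp

theorem pvBubble_main : ∀ (k : Nat) (p s : List Int), p.length = k + 1 →
    s.Pairwise (· ≤ ·) → (∀ a ∈ p, ∀ b ∈ s, a ≤ b) →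
    (pvBubble k (p ++ s)).Pairwise (· ≤ ·) ∧ (pvBubble k (p ++ s)).Perm (p ++ s)
  | 0, p, s, hlen, hs, hbd => by
    obtain ⟨a, rfl⟩ : ∃ a, p = [a] := by
      match p, hlen with
      | [a], _ => exact ⟨a, rfl⟩
    refine ⟨?_, by simp [pvBubble]⟩
    simp only [pvBubble, List.cons_append, List.nil_append]
    exact List.pairwise_cons.mpr ⟨fun b hb => hbd a (by simp) b hb, hs⟩
  | k + 1, p, s, hlen, hs, hbd => by
    have hp : p ≠ [] := by intro h; simp [h] at hlen
    obtain ⟨q, M, heq, hperm, hbnd⟩ := pvPass_last p hp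
    have hqlen : q.length = k + 1 := by
      have := hperm.length_eq; simp at this; omega
    have hM : M ∈ p := hperm.mem_iff.mp (by simp)
    have hstep : pvPass (k + 1) (p ++ s) = (q ++ [M]) ++ s := by
      rw [pvPass_append (k + 1) p s (by omega), show k + 1 = p.length - 1 by omega, heq]
    have hs' : (M :: s).Pairwise (· ≤ ·) :=
      List.pairwise_cons.mpr ⟨fun b hb => hbd M hM b hb, hs⟩
    have hbd' : ∀ a ∈ q, ∀ b ∈ M :: s, a ≤ b := by
      intro a ha b hb
      have hap : a ∈ p := hperm.mem_iff.mp (by simp [ha])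
      rcases List.mem_cons.mp hb with rfl | hb
      · exact hbnd a ha
      · exact hbd a hap b hb
    have ih := pvBubble_main k q (M :: s) hqlen hs' hbd'
    have hrw : q ++ M :: s = (q ++ [M]) ++ s := by simp
    rw [show pvBubble (k + 1) (p ++ s) = pvBubble k (pvPass (k + 1) (p ++ s)) from rfl,
      hstep, ← hrw]
    exact ⟨ih.1, ih.2.trans (by rw [hrw]; exact hperm.append_right s)⟩

theorem pvBubble_sorts (l : List Int) :
    (pvBubble (l.length - 1) l).Pairwise (· ≤ ·) ∧ (pvBubble (l.length - 1) l).Perm l := by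
  match l with
  | [] => exact ⟨by simp [pvBubble], by simp [pvBubble]⟩
  | a :: t =>
    have := pvBubble_main t.length (a :: t) [] (by simp) (by simp) (by simp)
    simpa using this

theorem pvInsort_perm : ∀ (l : List Int) (x : Int), (pvInsort l x).Perm (x :: l)
  | [], x => by simp [pvInsort]
  | a :: t, x => by
    simp only [pvInsort]
    split_ifs
    · exact ((pvInsort_perm t x).cons a).trans (List.Perm.swap x a t)
    · exact List.Perm.refl _

theorem pvInsort_pairwise : ∀ (l : List Int) (x : Int), l.Pairwise (· ≤ ·) →
    (pvInsort l x).Pairwise (· ≤ ·)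
  | [], x, _ => by simp [pvInsort]
  | a :: t, x, h => by
    obtain ⟨ha, ht⟩ := List.pairwise_cons.mp h
    simp only [pvInsort]
    split_ifs with hax
    · refine List.pairwise_cons.mpr ⟨?_, pvInsort_pairwise t x ht⟩
      intro b hb
      rcases List.mem_cons.mp ((pvInsort_perm t x).mem_iff.mp hb) with rfl | hb
      · exact hax
      · exact ha b hb
    · refine List.pairwise_cons.mpr ⟨?_, h⟩
      intro b hb
      rcases List.mem_cons.mp hb with rfl | hb
      · omega
      · exact le_trans (by omega) (ha b hb)

-- the shared odd test, as a Bool predicate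
def pvOdd (n : Int) : Bool := decide (PySem.Int.mod n 2 ≠ 0)

theorem foldB_spec : ∀ (l acc : List Int), acc.Pairwise (· ≤ ·) →
    (l.foldl (fun result num => if PySem.Int.mod num 2 ≠ 0 then pvInsort result num else result) acc).Pairwise (· ≤ ·) ∧
    (l.foldl (fun result num => if PySem.Int.mod num 2 ≠ 0 then pvInsort result num else result) acc).Perm
      (acc ++ l.filter pvOdd)
  | [], acc, h => ⟨h, by simp⟩
  | num :: t, acc, h => by
    simp only [List.foldl_cons]
    by_cases hodd : PySem.Int.mod num 2 ≠ 0
    · have ih := foldB_spec t (pvInsort acc num) (pvInsort_pairwise acc num h)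
      have hodd' : ¬ (num % 2 = 0) := by simpa [PySem.Int.mod, Int.fmod_eq_emod] using hodd
      rw [if_pos hodd]
      refine ⟨ih.1, ih.2.trans ?_⟩
      have h1 : (pvInsort acc num ++ t.filter pvOdd).Perm ((num :: acc) ++ t.filter pvOdd) :=
        (pvInsort_perm acc num).append_right _
      have h2 : ((num :: acc) ++ t.filter pvOdd).Perm (acc ++ num :: t.filter pvOdd) := by
        simpa using List.perm_middle.symm
      have h3 : (num :: t).filter pvOdd = num :: t.filter pvOdd := by
        simp [List.filter_cons, pvOdd, PySem.Int.mod, Int.fmod_eq_emod]; omega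
      rw [h3]; exact h1.trans h2
    · have ih := foldB_spec t acc h
      have hodd' : num % 2 = 0 := by simpa [PySem.Int.mod, Int.fmod_eq_emod] using hodd
      rw [if_neg hodd]
      have h3 : (num :: t).filter pvOdd = t.filter pvOdd := by
        simp [List.filter_cons, pvOdd, PySem.Int.mod, Int.fmod_eq_emod]; omega
      rw [h3]; exact ih
  termination_by l => l.length

theorem filterA_spec (l : List Int) :
    l.foldl (fun acc num => if PySem.Int.mod num 2 ≠ 0 then acc ++ [num] else acc) [] =
      l.filter pvOdd := by
  have hfun : (fun (acc : List Int) num => if PySem.Int.mod num 2 ≠ 0 then acc ++ [num] else acc) =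
      (fun acc num => if pvOdd num = true then acc ++ [id num] else acc) := by
    funext acc num; simp [pvOdd]
  rw [hfun, PySem.List.foldl_append_if pvOdd id l []]
  simp

-- ===== VERDICT (by name: the statement is the Claim_ definition above) =====
theorem oddnumslist_spec : Claim_equal_oddnumslist := by
  intro listA listB _
  unfold Spec_oddnumslist oddnumslist oddnumslist_alt
  simp only [filterA_spec]
  obtain ⟨hA1, hA2⟩ := pvBubble_sorts ((listA ++ listB).filter pvOdd)
  obtain ⟨hB1, hB2⟩ := foldB_spec (listA ++ listB) [] (by simp)
  simp only [List.nil_append] at hB2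
  exact List.Perm.eq_of_pairwise (fun a b _ _ h1 h2 => le_antisymm h1 h2) hA1 hB1
    (hA2.trans hB2.symm)
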